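-- pv_equiv track=rewrite | github.com/JensMaeland/aoc23 | 3/a.py | getOccurencesOfSymbols
-- ===== SOURCE A (Python) =====
-- def getOccurencesOfSymbols(input):
--     symbols = []
--     for line in input:
--         for char in line:
--             if char not in symbols:
--                 symbols.append(char)
--     symbols.sort()
--     return symbols
-- ===== SOURCE B (Python) =====
-- def _adj(xs):
--     # xs is sorted: keep xs[i] only when it differs from its successor (one element per run)
--     out = []
--     n = len(xs)
--     for i in range(n):
--         if i + 1 == n or xs[i] != xs[i + 1]:
--             out.append(xs[i])
--     return out
--
-- def getOccurencesOfSymbols(input):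
--     chars = sorted(c for line in input for c in line)
--     return _adj(chars)
-- ===== Notes on version B (the rewrite author's own statement) =====
-- stated objective: alternative
-- what changed: B flattens all characters keeping duplicates, sorts the full multiset, and deduplicates by a single adjacency pass, instead of A's quadratic membership-test dedup followed by a sort.
import Mathlib
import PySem

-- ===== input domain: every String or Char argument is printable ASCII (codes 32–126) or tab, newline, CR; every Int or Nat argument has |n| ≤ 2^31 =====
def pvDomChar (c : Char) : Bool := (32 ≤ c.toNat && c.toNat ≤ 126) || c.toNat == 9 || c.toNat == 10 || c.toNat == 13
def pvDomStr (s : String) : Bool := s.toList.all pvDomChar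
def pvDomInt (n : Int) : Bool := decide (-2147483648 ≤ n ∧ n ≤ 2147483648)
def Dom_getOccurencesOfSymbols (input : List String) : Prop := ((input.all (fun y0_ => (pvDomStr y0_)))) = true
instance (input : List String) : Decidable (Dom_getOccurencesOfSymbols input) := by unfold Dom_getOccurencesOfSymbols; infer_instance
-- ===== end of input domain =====

-- B flattens all characters keeping duplicates, sorts the full list, and deduplicates by an
-- adjacency-recursion pass, instead of A's membership-test dedup-while-collecting followed by a sort.

-- ===== PORT A =====
def getOccurencesOfSymbols (input : List String) : List String :=
  let symbols :=
    input.foldl (fun symbols line =>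
      (line.toList.map String.singleton).foldl (fun symbols char =>
        if char ∈ symbols then symbols else symbols ++ [char]) symbols) []
  PySem.List.sorted symbols (fun x => x)

-- ===== PORT B =====
-- keep one element per run of equal adjacent elements (Source B's _adj, as structural recursion)
def pvAdj : List String → List String
  | [] => []
  | [x] => [x]
  | x :: y :: t => if x = y then pvAdj (y :: t) else x :: pvAdj (y :: t)

def getOccurencesOfSymbols_alt (input : List String) : List String :=
  let chars := input.flatMap (fun line => line.toList.map String.singleton)
  pvAdj (PySem.List.sorted chars (fun c => c))

-- ===== PRECONDITION & SPEC =====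
def Spec_getOccurencesOfSymbols (input : List String) (out : List String) : Prop := out = getOccurencesOfSymbols_alt input
instance (input : List String) (out : List String) : Decidable (Spec_getOccurencesOfSymbols input out) := by unfold Spec_getOccurencesOfSymbols; infer_instance

-- ===== CLAIM (what is proved, stated in full; the proofs are below) =====
def Claim_equal_getOccurencesOfSymbols : Prop := ∀ (input : List String), Dom_getOccurencesOfSymbols input → Spec_getOccurencesOfSymbols input (getOccurencesOfSymbols input)

-- ===== LEMMAS AND PROOFS =====

-- A's dedup-while-collecting loop body is PySem.Set.add
theorem pvA_step_eq_add (s : List String) (c : String) :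
    (if c ∈ s then s else s ++ [c]) = PySem.Set.add s c := by
  simp [PySem.Set.add, List.contains_eq_mem]

-- A's nested collection loop builds Set.ofList of the flattened character list
theorem pvA_collect_eq_ofList (input : List String) (init : List String) :
    input.foldl (fun symbols line =>
      (line.toList.map String.singleton).foldl (fun symbols char =>
        if char ∈ symbols then symbols else symbols ++ [char]) symbols) init
      = (input.flatMap (fun line => line.toList.map String.singleton)).foldl PySem.Set.add init := by
  induction input generalizing init with
  | nil => rfl
  | cons l t ih =>
      simp only [List.foldl_cons, List.flatMap_cons, List.foldl_append, ih]
      congr 1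
      exact PySem.List.foldl_congr_mem _ _ _ _ (fun s c _ => pvA_step_eq_add s c)

theorem pvAdj_mem (l : List String) (a : String) : a ∈ pvAdj l ↔ a ∈ l := by
  induction l with
  | nil => simp [pvAdj]
  | cons x t ih =>
      cases t with
      | nil => simp [pvAdj]
      | cons y u =>
          by_cases h : x = y
          · subst h
            rw [show pvAdj (x :: x :: u) = pvAdj (x :: u) from by simp [pvAdj], ih]
            simp only [List.mem_cons]; tauto
          · simp [pvAdj, h, ih]

theorem pvAdj_pairwise_lt (l : List String) (h : l.Pairwise (· ≤ ·)) :
    (pvAdj l).Pairwise (· < ·) := by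
  induction l with
  | nil => exact List.Pairwise.nil
  | cons x t ih =>
      cases t with
      | nil => simp [pvAdj]
      | cons y u =>
          rcases List.pairwise_cons.mp h with ⟨hx, ht⟩
          by_cases hxy : x = y
          · simpa [pvAdj, hxy] using ih ht
          · simp only [pvAdj, if_neg hxy]
            refine List.pairwise_cons.mpr ⟨?_, ih ht⟩
            intro z hz
            have hz' : z ∈ y :: u := (pvAdj_mem _ _).mp hz
            have hxz : x ≤ z := hx z hz'
            rcases List.mem_cons.mp hz' with rfl | hz2
            · exact lt_of_le_of_ne hxz hxy
            · have hyz : y ≤ z := (List.pairwise_cons.mp ht).1 z hz2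
              exact lt_of_lt_of_le (lt_of_le_of_ne (hx y (by simp)) hxy) hyz

-- ===== VERDICT (by name: the statement is the Claim_ definition above) =====
theorem getOccurencesOfSymbols_spec : Claim_equal_getOccurencesOfSymbols := by
  intro input _
  show getOccurencesOfSymbols input = getOccurencesOfSymbols_alt input
  unfold getOccurencesOfSymbols getOccurencesOfSymbols_alt
  set flat := input.flatMap (fun line => line.toList.map String.singleton) with hflat
  rw [pvA_collect_eq_ofList]
  have hofl : flat.foldl PySem.Set.add [] = PySem.Set.ofList flat := rfl
  rw [hofl]
  -- left side: sorted(set(flat)), strictly increasing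
  have hL : (PySem.List.sorted (PySem.Set.ofList flat) (fun x => x)).Pairwise (· < ·) :=
    PySem.List.sorted_ofList_pairwise_lt flat
  -- right side: adjacency-dedup of sorted(flat), strictly increasing
  have hS : (PySem.List.sorted flat (fun c => c)).Pairwise (· ≤ ·) := by
    simpa using PySem.List.sorted_pairwise flat (fun c => c)
  have hR : (pvAdj (PySem.List.sorted flat (fun c => c))).Pairwise (· < ·) :=
    pvAdj_pairwise_lt _ hS
  -- same members
  have hmem : ∀ a, a ∈ PySem.List.sorted (PySem.Set.ofList flat) (fun x => x) ↔
      a ∈ pvAdj (PySem.List.sorted flat (fun c => c)) := by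
    intro a
    rw [PySem.List.mem_sorted, pvAdj_mem, PySem.List.mem_sorted, PySem.Set.mem_ofList]
  have hperm : (PySem.List.sorted (PySem.Set.ofList flat) (fun x => x)).Perm
      (pvAdj (PySem.List.sorted flat (fun c => c))) :=
    (List.perm_ext_iff_of_nodup hL.nodup hR.nodup).mpr hmem
  exact hperm.eq_of_pairwise (le := (· ≤ ·))
    (fun a b _ _ h1 h2 => le_antisymm h1 h2)
    (hL.imp le_of_lt) (hR.imp le_of_lt)
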